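-- pv_equiv track=rewrite | github.com/compbio-mallory/sc_longitudinal_infer | LACE_exp/getSNVrelations.py | getAllParentMutations
-- ===== SOURCE A (Python) =====
-- def getAllParentMutations(p, parent_child, merged_mutations):
--     all_mut = []
--     for parent, child in parent_child.items():
--         if p in child:
--             # Then look for the mutations for this parent in merged_mutations to get all the ancestral mutations
--             for pm, cm in merged_mutations.items():
--                 if parent in cm:
--                     all_mut.append(pm)
--                     all_mut.extend(cm)
--     return all_mut
-- ===== SOURCE B (Python) =====
-- def getAllParentMutations(p, parent_child, merged_mutations):
--     # Index each mutation element to the merged_mutations blocks containing it,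
--     # so each matching parent needs a dictionary lookup instead of a scan of merged_mutations.
--     index = {}
--     for pm, cm in merged_mutations.items():
--         block = [pm] + cm
--         for e in dict.fromkeys(cm):
--             index.setdefault(e, []).append(block)
--     out = []
--     for parent, child in parent_child.items():
--         if p in child:
--             for block in index.get(parent, []):
--                 out.extend(block)
--     return out
-- ===== Notes on version B (the rewrite author's own statement) =====
-- stated objective: alternative
-- what changed: B builds, in one pass over merged_mutations, a dictionary mapping each mutation element to the blocks containing it, replacing A's per-matching-parent rescan of merged_mutations by a single dictionary lookup; it trades A's repeated scans for one indexing pass plus index memory.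
import Mathlib
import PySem

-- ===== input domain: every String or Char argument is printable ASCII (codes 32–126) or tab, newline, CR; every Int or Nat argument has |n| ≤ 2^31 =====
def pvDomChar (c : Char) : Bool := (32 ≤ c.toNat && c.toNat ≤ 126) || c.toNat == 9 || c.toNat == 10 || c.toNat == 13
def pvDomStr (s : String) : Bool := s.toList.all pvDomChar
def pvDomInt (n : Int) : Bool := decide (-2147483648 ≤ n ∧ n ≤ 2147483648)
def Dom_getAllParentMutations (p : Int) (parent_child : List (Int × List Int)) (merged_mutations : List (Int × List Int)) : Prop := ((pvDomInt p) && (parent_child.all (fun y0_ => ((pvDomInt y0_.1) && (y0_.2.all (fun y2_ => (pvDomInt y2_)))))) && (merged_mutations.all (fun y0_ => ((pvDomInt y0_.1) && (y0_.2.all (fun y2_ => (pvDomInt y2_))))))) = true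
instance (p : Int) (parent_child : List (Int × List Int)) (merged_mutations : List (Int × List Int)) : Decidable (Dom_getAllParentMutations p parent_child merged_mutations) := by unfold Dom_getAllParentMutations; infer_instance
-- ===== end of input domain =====

-- B replaces A's per-matching-parent rescan of merged_mutations by a dictionary, built once,
-- mapping each element to the blocks containing it (objective: alternative lookup-based algorithm).

-- ===== PORT A =====
def getAllParentMutations (p : Int) (parent_child : List (Int × List Int)) (merged_mutations : List (Int × List Int)) : List Int :=
  parent_child.foldl (fun all_mut pr =>
    if p ∈ pr.2 then
      merged_mutations.foldl (fun am q =>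
        if pr.1 ∈ q.2 then (am ++ [q.1]) ++ q.2 else am) all_mut
    else all_mut) []

-- ===== PORT B =====
-- index: each element e ↦ the blocks [pm] + cm of the merged_mutations entries whose cm contains e
def pvIndex_getAllParentMutations (merged_mutations : List (Int × List Int)) : PySem.Dict Int (List (List Int)) :=
  merged_mutations.foldl (fun d q =>
    (PySem.List.dedup q.2).foldl (fun d e => d.modify e [] (fun l => l ++ [q.1 :: q.2])) d)
    PySem.Dict.empty

def getAllParentMutations_alt (p : Int) (parent_child : List (Int × List Int)) (merged_mutations : List (Int × List Int)) : List Int :=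
  let index := pvIndex_getAllParentMutations merged_mutations
  parent_child.foldl (fun out pr =>
    if p ∈ pr.2 then
      (index.getD pr.1 []).foldl (fun out blk => out ++ blk) out
    else out) []

-- ===== PRECONDITION & SPEC =====
def Spec_getAllParentMutations (p : Int) (parent_child : List (Int × List Int)) (merged_mutations : List (Int × List Int)) (out : List Int) : Prop := out = getAllParentMutations_alt p parent_child merged_mutations
instance (p : Int) (parent_child : List (Int × List Int)) (merged_mutations : List (Int × List Int)) (out : List Int) : Decidable (Spec_getAllParentMutations p parent_child merged_mutations out) := by unfold Spec_getAllParentMutations; infer_instance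

-- ===== CLAIM (what is proved, stated in full; the proofs are below) =====
def Claim_equal_getAllParentMutations : Prop := ∀ (p : Int) (parent_child : List (Int × List Int)) (merged_mutations : List (Int × List Int)), Dom_getAllParentMutations p parent_child merged_mutations → Spec_getAllParentMutations p parent_child merged_mutations (getAllParentMutations p parent_child merged_mutations)

-- ===== LEMMAS AND PROOFS =====

-- one merged entry's inner loop over its deduplicated elements: key x gains blk iff x is among them
theorem pv_getD_fold_modify (b : List Int) (S : List Int) (hS : S.Nodup)
    (d : PySem.Dict Int (List (List Int))) (x : Int) :
    (S.foldl (fun d e => d.modify e [] (fun l => l ++ [b])) d).getD x []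
      = d.getD x [] ++ (if x ∈ S then [b] else []) := by
  induction S generalizing d with
  | nil => simp
  | cons e S ih =>
    simp only [List.foldl_cons]
    rw [ih (List.Nodup.of_cons hS)]
    rw [PySem.Dict.getD_modify]
    by_cases hx : x = e
    · subst hx
      have hxs : x ∉ S := (List.nodup_cons.mp hS).1
      simp [hxs]
    · simp [hx, List.mem_cons]

theorem pv_getD_index (mm : List (Int × List Int)) (d : PySem.Dict Int (List (List Int))) (x : Int) :
    (mm.foldl (fun d q =>
        (PySem.List.dedup q.2).foldl (fun d e => d.modify e [] (fun l => l ++ [q.1 :: q.2])) d) d).getD x []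
      = d.getD x [] ++ ((mm.filter (fun q => decide (x ∈ q.2))).map (fun q => q.1 :: q.2)) := by
  induction mm generalizing d with
  | nil => simp
  | cons q mm ih =>
    simp only [List.foldl_cons, List.filter_cons]
    rw [ih, pv_getD_fold_modify _ _ (PySem.List.nodup_dedup q.2)]
    by_cases hx : x ∈ q.2
    · simp [hx, List.append_assoc]
    · simp [hx]

theorem pv_foldl_extend (l : List (List Int)) (acc : List Int) :
    l.foldl (fun out blk => out ++ blk) acc = acc ++ l.flatten := by
  induction l generalizing acc with
  | nil => simp
  | cons b l ih => simp [ih, List.append_assoc]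

theorem pv_A_inner (par : Int) (mm : List (Int × List Int)) (acc : List Int) :
    (mm.foldl (fun am q => if par ∈ q.2 then (am ++ [q.1]) ++ q.2 else am) acc)
      = acc ++ ((mm.filter (fun q => decide (par ∈ q.2))).map (fun q => q.1 :: q.2)).flatten := by
  induction mm generalizing acc with
  | nil => simp
  | cons q mm ih =>
    simp only [List.foldl_cons, List.filter_cons]
    rw [ih]
    by_cases h : par ∈ q.2
    · simp [h, List.append_assoc]
    · simp [h]

-- ===== VERDICT (by name: the statement is the Claim_ definition above) =====
theorem getAllParentMutations_spec : Claim_equal_getAllParentMutations := by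
  intro p pc mm hd
  clear hd
  unfold Spec_getAllParentMutations getAllParentMutations getAllParentMutations_alt
  simp only []
  suffices h : ∀ acc : List Int,
      pc.foldl (fun all_mut pr =>
        if p ∈ pr.2 then
          mm.foldl (fun am q => if pr.1 ∈ q.2 then (am ++ [q.1]) ++ q.2 else am) all_mut
        else all_mut) acc
      = pc.foldl (fun out pr =>
        if p ∈ pr.2 then
          ((pvIndex_getAllParentMutations mm).getD pr.1 []).foldl (fun out blk => out ++ blk) out
        else out) acc from h []
  intro acc
  induction pc generalizing acc with
  | nil => rfl
  | cons pr pc ih =>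
    simp only [List.foldl_cons]
    rw [ih]
    congr 1
    by_cases hp : p ∈ pr.2
    · simp only [hp, if_true]
      rw [pv_A_inner, pv_foldl_extend]
      have h2 := pv_getD_index mm PySem.Dict.empty pr.1
      simp only [PySem.Dict.getD_empty, List.nil_append] at h2
      unfold pvIndex_getAllParentMutations
      rw [h2]
    · simp [hp]
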